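-- pv_equiv track=rewrite | github.com/madeinplutofabio/command-scope-contract | csc_runner/pathutil.py | _glob_literal_prefix
-- ===== SOURCE A (Python) =====
-- _GLOB_META = frozenset("*?[")
--
-- def _glob_literal_prefix(path: str) -> str:
--     """Extract the literal directory prefix before the first glob metacharacter.
--
--     For example:
--         /workspace/out/**  -> /workspace/out
--         /workspace/out/*.log -> /workspace/out
--         /workspace/out -> /workspace/out  (no glob)
--
--     Returns the longest directory prefix that contains no metacharacters.
--     """
--     for i, ch in enumerate(path):
--         if ch in _GLOB_META:
--             # Find the last separator before the metacharacter
--             prefix = path[:i]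
--             sep_idx = max(prefix.rfind("/"), prefix.rfind("\\"))
--             if sep_idx >= 0:
--                 return path[:sep_idx]
--             return ""
--     return path
-- ===== SOURCE B (Python) =====
-- def _glob_literal_prefix(path: str) -> str:
--     """Single forward pass: track the last separator index seen; on the first
--     glob metachar, cut there immediately (no rfind back-scans)."""
--     last_sep = -1
--     for i, ch in enumerate(path):
--         if ch == "*" or ch == "?" or ch == "[":
--             return path[:last_sep] if last_sep >= 0 else ""
--         if ch == "/" or ch == "\\":
--             last_sep = i
--     return path
-- ===== Notes on version B (the rewrite author's own statement) =====
-- stated objective: alternative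
-- what changed: Replaces the find-metachar-then-double-rfind-back-scan with a single forward pass that maintains a running last-separator index and cuts immediately at the first metachar.
import Mathlib
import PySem

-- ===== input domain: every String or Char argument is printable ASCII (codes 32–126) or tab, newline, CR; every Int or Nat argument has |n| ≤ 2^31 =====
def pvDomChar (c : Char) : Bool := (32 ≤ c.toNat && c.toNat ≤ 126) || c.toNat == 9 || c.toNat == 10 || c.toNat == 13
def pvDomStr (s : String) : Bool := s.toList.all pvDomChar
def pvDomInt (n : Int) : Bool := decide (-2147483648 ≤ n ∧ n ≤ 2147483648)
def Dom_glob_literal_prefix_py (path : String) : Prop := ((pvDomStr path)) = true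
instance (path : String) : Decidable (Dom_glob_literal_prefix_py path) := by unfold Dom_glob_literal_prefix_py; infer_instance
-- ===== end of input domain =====

-- B replaces A's metachar-find followed by two rfind back-scans with one forward
-- pass maintaining a running last-separator index (alternative decomposition).


-- ===== PORT A =====
-- hand port of Python str.rfind for a single character (exact: last index or -1)
def pvRFind : List Char → Char → Int
  | [], _ => -1
  | x :: xs, c =>
    let r := pvRFind xs c
    if r ≥ 0 then r + 1 else if x = c then 0 else -1

-- the 'for i, ch in enumerate(path)' loop of A: rem is the unread suffix, i its start index
def pvLoopA (full : List Char) : List Char → Nat → String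
  | [], _ => String.ofList full
  | ch :: rest, i =>
    if ch = '*' ∨ ch = '?' ∨ ch = '[' then
      let pre := full.take i
      let sep : Int := max (pvRFind pre '/') (pvRFind pre '\\')
      if sep ≥ 0 then String.ofList (full.take sep.toNat) else ""
    else pvLoopA full rest (i + 1)

def glob_literal_prefix_py (path : String) : String :=
  pvLoopA path.toList path.toList 0

-- ===== PORT B =====
-- single forward pass; ls = index of the last separator seen so far (-1 if none)
def pvLoopB (full : List Char) : List Char → Nat → Int → String
  | [], _, _ => String.ofList full
  | ch :: rest, i, ls =>
    if ch = '*' ∨ ch = '?' ∨ ch = '[' then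
      if ls ≥ 0 then String.ofList (full.take ls.toNat) else ""
    else pvLoopB full rest (i + 1) (if ch = '/' ∨ ch = '\\' then (i : Int) else ls)

def glob_literal_prefix_py_alt (path : String) : String :=
  pvLoopB path.toList path.toList 0 (-1)

-- ===== PRECONDITION & SPEC =====
def Spec_glob_literal_prefix_py (path : String) (out : String) : Prop := out = glob_literal_prefix_py_alt path
instance (path : String) (out : String) : Decidable (Spec_glob_literal_prefix_py path out) := by unfold Spec_glob_literal_prefix_py; infer_instance

-- ===== CLAIM (what is proved, stated in full; the proofs are below) =====
def Claim_equal_glob_literal_prefix_py : Prop := ∀ (path : String), Dom_glob_literal_prefix_py path → Spec_glob_literal_prefix_py path (glob_literal_prefix_py path)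

-- ===== LEMMAS AND PROOFS =====

lemma pvRFind_lt_length (xs : List Char) (c : Char) : pvRFind xs c < xs.length := by
  induction xs with
  | nil => simp [pvRFind]
  | cons x xs ih =>
    simp only [pvRFind, List.length_cons]
    split_ifs <;> push_cast <;> omega

lemma pvRFind_append_singleton (pre : List Char) (c' c : Char) :
    pvRFind (pre ++ [c']) c = if c' = c then (pre.length : Int) else pvRFind pre c := by
  induction pre with
  | nil => simp [pvRFind]
  | cons x xs ih =>
    simp only [List.cons_append, pvRFind, ih, List.length_cons]
    by_cases h : c' = c
    · have : (0:Int) ≤ (xs.length : Int) := by positivity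
      simp [h]
      try omega
    · simp [h]

-- running last-separator state equals A's max of the two rfinds on the prefix read so far
lemma loop_agree (rem pre : List Char) :
    pvLoopA (pre ++ rem) rem pre.length
      = pvLoopB (pre ++ rem) rem pre.length
          (max (pvRFind pre '/') (pvRFind pre '\\')) := by
  induction rem generalizing pre with
  | nil => simp [pvLoopA, pvLoopB]
  | cons ch rest ih =>
    simp only [pvLoopA, pvLoopB]
    by_cases hm : ch = '*' ∨ ch = '?' ∨ ch = '['
    · simp only [if_pos hm]
      have htake : (pre ++ ch :: rest).take pre.length = pre := by
        simpa using List.take_left pre (ch :: rest)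
      simp [htake]
    · simp only [if_neg hm]
      have hrw : pre ++ ch :: rest = (pre ++ [ch]) ++ rest := by simp
      have hlen : pre.length + 1 = (pre ++ [ch]).length := by simp
      rw [hrw, hlen, ih (pre ++ [ch])]
      congr 1
      rw [pvRFind_append_singleton, pvRFind_append_singleton]
      by_cases hs : ch = '/' ∨ ch = '\\'
      · have h1 := pvRFind_lt_length pre '/'
        have h2 := pvRFind_lt_length pre '\\'
        rcases hs with hs | hs <;> subst hs <;>
          simp only [if_pos, reduceCtorEq, Char.reduceEq, if_true, if_false] <;>
          split_ifs <;> simp_all <;> omega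
      · push_neg at hs
        simp [hs.1, hs.2]

-- ===== VERDICT (by name: the statement is the Claim_ definition above) =====
theorem glob_literal_prefix_py_spec : Claim_equal_glob_literal_prefix_py := by
  intro path _
  unfold Spec_glob_literal_prefix_py glob_literal_prefix_py glob_literal_prefix_py_alt
  have := loop_agree path.toList []
  simpa [pvRFind] using this
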